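-- pv_equiv track=rewrite | github.com/KrisKennaway/ii-pix | screen.py | compute_fat_pixels
-- ===== SOURCE A (Python) =====
-- def compute_fat_pixels(screen_byte, last_pixels):
--     result = 0
--     for i in range(7):
--         bit = (screen_byte >> i) & 0b1
--         fat_bit = bit << 1 | bit
--         result |= fat_bit << (2 * i)
--     if screen_byte & 0x80:
--         # Palette bit shifts to the right
--         result <<= 1
--         result |= (last_pixels >> 7)
--
--     return result
-- ===== SOURCE B (Python) =====
-- def compute_fat_pixels(screen_byte, last_pixels):
--     # Branchless parallel bit-spread: double each of the 7 data bits in closed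
--     # form instead of accumulating them bit by bit in a loop.
--     x = screen_byte & 0x7F
--     x = (x | (x << 4)) & 0x0F0F
--     x = (x | (x << 2)) & 0x3333
--     x = (x | (x << 1)) & 0x5555
--     base = x | (x << 1)
--     if screen_byte & 0x80:
--         return (base << 1) | (last_pixels >> 7)
--     return base
-- ===== Notes on version B (the rewrite author's own statement) =====
-- stated objective: alternative
-- what changed: Replaces the 7-iteration per-bit accumulation loop with a closed-form branchless parallel bit-spread (mask sequence 0x0F0F/0x3333/0x5555) that doubles all seven bits at once, then ORs in the palette shift.
import Mathlib
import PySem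

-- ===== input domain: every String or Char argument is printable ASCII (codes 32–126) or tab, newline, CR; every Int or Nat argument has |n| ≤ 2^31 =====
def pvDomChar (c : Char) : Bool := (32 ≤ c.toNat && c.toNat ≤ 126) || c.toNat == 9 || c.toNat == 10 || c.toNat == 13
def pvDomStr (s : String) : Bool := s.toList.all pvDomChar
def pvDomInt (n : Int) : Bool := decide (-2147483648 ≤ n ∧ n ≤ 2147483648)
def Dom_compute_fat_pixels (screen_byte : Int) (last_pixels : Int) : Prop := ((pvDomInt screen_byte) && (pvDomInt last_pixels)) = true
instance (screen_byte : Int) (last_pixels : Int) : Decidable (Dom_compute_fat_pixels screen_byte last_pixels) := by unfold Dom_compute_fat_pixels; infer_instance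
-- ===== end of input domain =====

-- B replaces the per-bit accumulation loop by a closed-form branchless parallel
-- bit-spread (standard mask sequence); same exact values, no loop (objective: alternative/idiomatic).

-- ===== PORT A =====
def compute_fat_pixels (screen_byte : Int) (last_pixels : Int) : Int :=
  let result := (PySem.List.pyRange 0 7 1).foldl (fun result i =>
    let bit := PySem.Int.band (screen_byte >>> i.toNat) 1
    let fat_bit := PySem.Int.bor (bit <<< 1) bit
    PySem.Int.bor result (fat_bit <<< (2 * i).toNat)) 0
  if PySem.Int.band screen_byte 128 ≠ 0 then
    PySem.Int.bor (result <<< 1) (last_pixels >>> 7)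
  else result

-- ===== PORT B =====
def compute_fat_pixels_alt (screen_byte : Int) (last_pixels : Int) : Int :=
  let x0 := PySem.Int.band screen_byte 127
  let x1 := PySem.Int.band (PySem.Int.bor x0 (x0 <<< 4)) 0x0F0F
  let x2 := PySem.Int.band (PySem.Int.bor x1 (x1 <<< 2)) 0x3333
  let x3 := PySem.Int.band (PySem.Int.bor x2 (x2 <<< 1)) 0x5555
  let base := PySem.Int.bor x3 (x3 <<< 1)
  if PySem.Int.band screen_byte 128 ≠ 0 then
    PySem.Int.bor (base <<< 1) (last_pixels >>> 7)
  else base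

-- ===== PRECONDITION & SPEC =====
def Spec_compute_fat_pixels (screen_byte : Int) (last_pixels : Int) (out : Int) : Prop := out = compute_fat_pixels_alt screen_byte last_pixels
instance (screen_byte : Int) (last_pixels : Int) (out : Int) : Decidable (Spec_compute_fat_pixels screen_byte last_pixels out) := by unfold Spec_compute_fat_pixels; infer_instance

-- ===== CLAIM (what is proved, stated in full; the proofs are below) =====
def Claim_equal_compute_fat_pixels : Prop := ∀ (screen_byte : Int) (last_pixels : Int), Dom_compute_fat_pixels screen_byte last_pixels → Spec_compute_fat_pixels screen_byte last_pixels (compute_fat_pixels screen_byte last_pixels)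

-- ===== LEMMAS AND PROOFS =====

-- A's loop body, bit i of e doubled into positions 2i, 2i+1
def pvBit (e : Int) (i : Nat) : Int := PySem.Int.band (e >>> (i : Int)) 1
def pvTerm (e : Int) (i : Nat) : Int :=
  PySem.Int.bor (pvBit e i <<< 1) (pvBit e i) <<< ((2 * i : Nat) : Int)
def pvLoop (e : Int) : Int :=
  PySem.Int.bor (PySem.Int.bor (PySem.Int.bor (PySem.Int.bor (PySem.Int.bor
    (PySem.Int.bor (PySem.Int.bor 0 (pvTerm e 0)) (pvTerm e 1)) (pvTerm e 2))
    (pvTerm e 3)) (pvTerm e 4)) (pvTerm e 5)) (pvTerm e 6)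

-- B's spread chain applied to an already-masked value e
def pvSpread (e : Int) : Int :=
  let x1 := PySem.Int.band (PySem.Int.bor e (e <<< 4)) 0x0F0F
  let x2 := PySem.Int.band (PySem.Int.bor x1 (x1 <<< 2)) 0x3333
  let x3 := PySem.Int.band (PySem.Int.bor x2 (x2 <<< 1)) 0x5555
  PySem.Int.bor x3 (x3 <<< 1)

lemma pvRange7 : PySem.List.pyRange 0 7 1 = [0, 1, 2, 3, 4, 5, 6] := by decide

lemma pvA_closed (b lp : Int) :
    compute_fat_pixels b lp =
      (if PySem.Int.band b 128 ≠ 0 then PySem.Int.bor (pvLoop b <<< 1) (lp >>> 7) else pvLoop b) := by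
  unfold compute_fat_pixels
  rw [pvRange7]
  simp only [List.foldl, pvLoop, pvTerm, pvBit]
  rfl

lemma pvB_closed (b lp : Int) :
    compute_fat_pixels_alt b lp =
      (if PySem.Int.band b 128 ≠ 0 then
        PySem.Int.bor (pvSpread (PySem.Int.band b 127) <<< 1) (lp >>> 7)
      else pvSpread (PySem.Int.band b 127)) := by
  unfold compute_fat_pixels_alt pvSpread
  rfl

lemma pvAnd127 (n : Nat) : n &&& 127 = n % 128 := Nat.and_two_pow_sub_one_eq_mod n 7

lemma pvBand127_eq (a : Int) : PySem.Int.band a 127 = a % 128 := by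
  by_cases h : 0 ≤ a
  · rw [show PySem.Int.band a 127 = ((a.toNat &&& (127 : Int).toNat : Nat) : Int) from by
      unfold PySem.Int.band; rw [if_pos h, if_pos (by norm_num)]]
    have h127 : (127 : Int).toNat = 127 := rfl
    rw [h127, pvAnd127]
    omega
  · rw [show PySem.Int.band a 127 = (((127 : Int).toNat - ((127 : Int).toNat &&& (-a - 1).toNat) : Nat) : Int) from by
      unfold PySem.Int.band; rw [if_neg (by omega), if_pos (by norm_num)]]
    have h127 : (127 : Int).toNat = 127 := rfl
    rw [h127, Nat.land_comm, pvAnd127]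
    omega

lemma pvBit_cong (b : Int) (i : Nat) (h : i < 7) : pvBit b i = pvBit (b % 128) i := by
  unfold pvBit
  rw [Int.shiftRight_natCast_right, Int.shiftRight_natCast_right,
    PySem.Int.band_one, PySem.Int.band_one,
    PySem.Int.mod_eq_emod_of_pos (by norm_num), PySem.Int.mod_eq_emod_of_pos (by norm_num),
    Int.shiftRight_eq_div_pow, Int.shiftRight_eq_div_pow]
  have h0 : 0 ≤ b % 128 := Int.emod_nonneg b (by norm_num)
  have h1 : b % 128 < 128 := Int.emod_lt_of_pos b (by norm_num)
  interval_cases i <;> norm_num <;> omega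

lemma pvLoop_cong (b : Int) : pvLoop b = pvLoop (b % 128) := by
  unfold pvLoop pvTerm
  rw [pvBit_cong b 0 (by norm_num), pvBit_cong b 1 (by norm_num), pvBit_cong b 2 (by norm_num),
    pvBit_cong b 3 (by norm_num), pvBit_cong b 4 (by norm_num), pvBit_cong b 5 (by norm_num),
    pvBit_cong b 6 (by norm_num)]

set_option maxRecDepth 100000 in
lemma pvCore_fin : ∀ n : Fin 128, pvLoop ((n : Nat) : Int) = pvSpread ((n : Nat) : Int) := by decide

lemma pvCore (e : Int) (h0 : 0 ≤ e) (h1 : e < 128) : pvLoop e = pvSpread e := by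
  have he : e = ((e.toNat : Nat) : Int) := by omega
  rw [he]
  exact pvCore_fin ⟨e.toNat, by omega⟩

-- ===== VERDICT (by name: the statement is the Claim_ definition above) =====
theorem compute_fat_pixels_spec : Claim_equal_compute_fat_pixels := by
  intro b lp _
  unfold Spec_compute_fat_pixels
  rw [pvA_closed, pvB_closed, pvBand127_eq, pvLoop_cong,
    pvCore (b % 128) (Int.emod_nonneg b (by norm_num)) (Int.emod_lt_of_pos b (by norm_num))]
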